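-- pv_equiv track=rewrite | github.com/komathi-pandiyan/python-programs | 07-11/Maximum index.py | max_index_difference
-- ===== SOURCE A (Python) =====
-- def max_index_difference(N, arr):
--     if N < 2:
--         return 0
--     left_min_index = [0] * N
--     left_min_index[0] = 0
--     for i in range(1, N):
--         if arr[i] < arr[left_min_index[i - 1]]:
--             left_min_index[i] = i
--         else:
--             left_min_index[i] = left_min_index[i - 1]
--     max_difference = -1
--     for j in range(N - 1, 0, -1):
--         while j > 0 and arr[left_min_index[j - 1]] < arr[j]:
--             max_difference = max(max_difference, j - left_min_index[j - 1])
--             j -= 1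
--     return max_difference
-- ===== SOURCE B (Python) =====
-- def max_index_difference(N, arr):
--     if N < 2:
--         return 0
--     best = -1
--     min_idx = 0
--     for k in range(1, N):
--         if arr[min_idx] < arr[k]:
--             best = max(best, k - min_idx)
--         if arr[k] < arr[min_idx]:
--             min_idx = k
--     return best
-- ===== Notes on version B (the rewrite author's own statement) =====
-- stated objective: faster
-- what changed: B replaces A's precomputed prefix-argmin array plus quadratic for-loop-with-inner-while scan by a single forward pass that maintains the running leftmost-minimum index and the best index difference.
import Mathlib
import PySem

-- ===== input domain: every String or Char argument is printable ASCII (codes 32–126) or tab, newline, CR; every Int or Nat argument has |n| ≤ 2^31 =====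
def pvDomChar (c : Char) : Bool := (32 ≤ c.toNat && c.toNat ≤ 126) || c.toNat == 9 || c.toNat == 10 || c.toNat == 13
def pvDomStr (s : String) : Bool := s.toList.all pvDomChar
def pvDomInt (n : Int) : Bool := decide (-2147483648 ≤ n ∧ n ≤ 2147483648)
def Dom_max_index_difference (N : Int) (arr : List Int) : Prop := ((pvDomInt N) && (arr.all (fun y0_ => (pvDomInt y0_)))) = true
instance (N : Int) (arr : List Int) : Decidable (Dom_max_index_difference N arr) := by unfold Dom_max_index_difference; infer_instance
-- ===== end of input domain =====

-- B replaces A's prefix-argmin array + quadratic rescans by one forward pass (running leftmost-min index); equal return value on Pre_.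

-- ===== PORT A =====
-- the inner 'while j > 0 and arr[left_min_index[j-1]] < arr[j]: ...; j -= 1' loop of A
def innerAwhile (arr lmi : List Int) (j : Int) (md : Int) : Int :=
  if _h : 0 < j ∧ PySem.List.pyGetD arr (PySem.List.pyGetD lmi (j - 1) 0) 0 < PySem.List.pyGetD arr j 0 then
    innerAwhile arr lmi (j - 1) (max md (j - PySem.List.pyGetD lmi (j - 1) 0))
  else md
termination_by j.toNat
decreasing_by omega

def max_index_difference (N : Int) (arr : List Int) : Int :=
  if N < 2 then 0
  else
    let lmi0 : List Int := PySem.List.pyRepeat [(0 : Int)] N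
    let lmi0 := PySem.List.pySetD lmi0 0 0
    let lmi := (PySem.List.pyRange 1 N 1).foldl (fun l i =>
      if PySem.List.pyGetD arr i 0 < PySem.List.pyGetD arr (PySem.List.pyGetD l (i - 1) 0) 0 then
        PySem.List.pySetD l i i
      else
        PySem.List.pySetD l i (PySem.List.pyGetD l (i - 1) 0)) lmi0
    (PySem.List.pyRange (N - 1) 0 (-1)).foldl (fun md j => innerAwhile arr lmi j md) (-1)

-- ===== PORT B =====
def max_index_difference_alt (N : Int) (arr : List Int) : Int :=
  if N < 2 then 0
  else
    ((PySem.List.pyRange 1 N 1).foldl (fun (s : Int × Int) k =>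
      ((if PySem.List.pyGetD arr s.2 0 < PySem.List.pyGetD arr k 0 then max s.1 (k - s.2) else s.1),
       (if PySem.List.pyGetD arr k 0 < PySem.List.pyGetD arr s.2 0 then k else s.2))) ((-1 : Int), (0 : Int))).1

-- ===== PRECONDITION & SPEC =====
-- Pre_ excludes exactly the inputs where Python A raises IndexError: 2 ≤ N but arr shorter than N.
def Pre_max_index_difference (N : Int) (arr : List Int) : Prop := 2 ≤ N → N ≤ arr.length
instance (N : Int) (arr : List Int) : Decidable (Pre_max_index_difference N arr) := by
  unfold Pre_max_index_difference; infer_instance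

def pvWitness_max_index_difference : Int × List Int := (3, [2, 1, 3])

def Spec_max_index_difference (N : Int) (arr : List Int) (out : Int) : Prop := out = max_index_difference_alt N arr
instance (N : Int) (arr : List Int) (out : Int) : Decidable (Spec_max_index_difference N arr out) := by unfold Spec_max_index_difference; infer_instance

-- ===== CLAIM (what is proved, stated in full; the proofs are below) =====
def Claim_equal_max_index_difference : Prop := ∀ (N : Int) (arr : List Int), Dom_max_index_difference N arr → Pre_max_index_difference N arr → Spec_max_index_difference N arr (max_index_difference N arr)

-- ===== LEMMAS AND PROOFS =====

-- prefix leftmost-argmin: the value left_min_index[k] of A, resp. min_idx of B after k steps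
def Lm (arr : List Int) : Nat → Int
  | 0 => 0
  | j + 1 =>
    if PySem.List.pyGetD arr ((j : Int) + 1) 0 < PySem.List.pyGetD arr (Lm arr j) 0 then (j : Int) + 1
    else Lm arr j

-- what one run of A's inner while loop computes when started at j
def chainA (arr : List Int) : Nat → Int → Int
  | 0, md => md
  | j + 1, md =>
    if PySem.List.pyGetD arr (Lm arr j) 0 < PySem.List.pyGetD arr ((j : Int) + 1) 0 then
      chainA arr j (max md (((j : Int) + 1) - Lm arr j))
    else md

-- B's best accumulator after m steps
def bspec (arr : List Int) : Nat → Int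
  | 0 => -1
  | j + 1 =>
    if PySem.List.pyGetD arr (Lm arr j) 0 < PySem.List.pyGetD arr ((j : Int) + 1) 0 then
      max (bspec arr j) (((j : Int) + 1) - Lm arr j)
    else bspec arr j

-- running max of the chain values, what A's outer loop accumulates
def Mspec (arr : List Int) : Nat → Int
  | 0 => -1
  | j + 1 => max (Mspec arr j) (chainA arr (j + 1) (-1))

-- A's first-loop body as a named step
def stepA (arr : List Int) (l : List Int) (i : Int) : List Int :=
  if PySem.List.pyGetD arr i 0 < PySem.List.pyGetD arr (PySem.List.pyGetD l (i - 1) 0) 0 then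
    PySem.List.pySetD l i i
  else
    PySem.List.pySetD l i (PySem.List.pyGetD l (i - 1) 0)

theorem le_chainA (arr : List Int) : ∀ (j : Nat) (md : Int), md ≤ chainA arr j md := by
  intro j
  induction j with
  | zero => intro md; simp [chainA]
  | succ j ih =>
    intro md
    simp only [chainA]
    split
    · exact le_trans (le_max_left _ _) (ih _)
    · exact le_refl _

theorem chainA_max (arr : List Int) : ∀ (j : Nat) (a b : Int),
    chainA arr j (max a b) = max a (chainA arr j b) := by
  intro j
  induction j with
  | zero => intro a b; simp [chainA]
  | succ j ih =>
    intro a b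
    simp only [chainA]
    split
    · rw [max_assoc, ih]
    · rfl

theorem neg_one_le_Mspec (arr : List Int) : ∀ m : Nat, -1 ≤ Mspec arr m := by
  intro m
  induction m with
  | zero => simp [Mspec]
  | succ m ih => exact le_trans ih (by simp [Mspec])

theorem chainA_le_Mspec (arr : List Int) : ∀ m : Nat, chainA arr m (-1) ≤ Mspec arr m := by
  intro m
  cases m with
  | zero => simp [chainA, Mspec]
  | succ m => simp [Mspec]

theorem bspec_eq_Mspec (arr : List Int) : ∀ m : Nat, bspec arr m = Mspec arr m := by
  intro m
  induction m with
  | zero => rfl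
  | succ m ih =>
    have hc : chainA arr m (-1) ≤ Mspec arr m := chainA_le_Mspec arr m
    simp only [bspec, Mspec, chainA]
    split
    · rw [ih]
      rw [show max (-1 : Int) (((m : Int) + 1) - Lm arr m) = max (((m : Int) + 1) - Lm arr m) (-1) from max_comm _ _]
      rw [chainA_max]
      omega
    · have := neg_one_le_Mspec arr m
      rw [ih]; omega

-- characterization of A's left_min_index array
theorem lmi_inv (arr : List Int) (n : Nat) (hn : 1 ≤ n) : ∀ m : Nat, m ≤ n - 1 →
    ((List.range m).foldl (fun l (k : Nat) => stepA arr l (1 + (k : Int))) (List.replicate n (0 : Int))).length = n ∧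
    ∀ k : Nat, k ≤ m →
      PySem.List.pyGetD ((List.range m).foldl (fun l (k : Nat) => stepA arr l (1 + (k : Int))) (List.replicate n (0 : Int))) (k : Int) 0 = Lm arr k := by
  intro m
  induction m with
  | zero =>
    intro _
    constructor
    · simp
    · intro k hk
      interval_cases k
      simp [Lm]
      cases n with
      | zero => omega
      | succ n => simp [List.replicate_succ]
  | succ m ih =>
    intro hm
    have ⟨hlen, hget⟩ := ih (by omega)
    rw [List.range_succ, List.foldl_append]
    set l := (List.range m).foldl (fun l (k : Nat) => stepA arr l (1 + (k : Int))) (List.replicate n (0 : Int)) with hl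
    simp only [List.foldl_cons, List.foldl_nil]
    have hcast : (1 : Int) + (m : Int) - 1 = (m : Int) := by ring
    have hread : PySem.List.pyGetD l ((1 : Int) + (m : Int) - 1) 0 = Lm arr m := by
      rw [hcast]; exact hget m (le_refl m)
    have hidx : (1 : Int) + (m : Int) = ((m + 1 : Nat) : Int) := by push_cast; ring
    have hlt : m + 1 < n := by omega
    unfold stepA
    rw [hread, hidx]
    have key : ∀ v : Int,
        (PySem.List.pySetD l ((m + 1 : Nat) : Int) v).length = n ∧
        ∀ k : Nat, k ≤ m + 1 →
          PySem.List.pyGetD (PySem.List.pySetD l ((m + 1 : Nat) : Int) v) (k : Int) 0 =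
            (if k = m + 1 then v else Lm arr k) := by
      intro v
      constructor
      · rw [PySem.List.pySetD_natCast]; simp [hlen]
      · intro k hk
        rw [PySem.List.pyGetD_pySetD_natCast l (m + 1) k v 0 (by omega)]
        by_cases hEq : k = m + 1
        · simp [hEq]
        · rw [if_neg hEq, if_neg hEq]
          exact hget k (by omega)
    split
    · rename_i hcond
      refine ⟨(key _).1, ?_⟩
      intro k hk
      rw [(key _).2 k hk]
      by_cases hEq : k = m + 1
      · subst hEq
        have : Lm arr (m + 1) = ((m + 1 : Nat) : Int) := by
          rw [Lm]
          rw [if_pos (by push_cast at hcond ⊢; convert hcond using 2)]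
          push_cast; ring
        simp [this]
      · simp [hEq]
    · rename_i hcond
      refine ⟨(key _).1, ?_⟩
      intro k hk
      rw [(key _).2 k hk]
      by_cases hEq : k = m + 1
      · subst hEq
        have : Lm arr (m + 1) = Lm arr m := by
          rw [Lm, if_neg (by push_cast at hcond ⊢; convert hcond using 2)]
        simp [this]
      · simp [hEq]

theorem innerA_eq_chainA (arr lmi : List Int) (n : Nat)
    (hlmi : ∀ k : Nat, k < n → PySem.List.pyGetD lmi (k : Int) 0 = Lm arr k) :
    ∀ (j : Nat), j < n → ∀ md, innerAwhile arr lmi (j : Int) md = chainA arr j md := by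
  intro j
  induction j with
  | zero =>
    intro _ md
    rw [innerAwhile]
    simp [chainA]
  | succ j ih =>
    intro hj md
    have hc1 : ((j + 1 : Nat) : Int) - 1 = (j : Int) := by push_cast; ring
    rw [innerAwhile]
    rw [hc1, hlmi j (by omega)]
    have hc2 : ((j + 1 : Nat) : Int) = (j : Int) + 1 := by push_cast; ring
    rw [hc2]
    simp only [chainA]
    by_cases hcond : PySem.List.pyGetD arr (Lm arr j) 0 < PySem.List.pyGetD arr ((j : Int) + 1) 0
    · rw [dif_pos ⟨by positivity, hcond⟩, if_pos hcond, ih (by omega)]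
    · rw [dif_neg (by intro hx; exact hcond hx.2), if_neg hcond]

theorem foldA_eq_Mspec (arr lmi : List Int) (n : Nat)
    (hlmi : ∀ k : Nat, k < n → PySem.List.pyGetD lmi (k : Int) 0 = Lm arr k) :
    ∀ a : Nat, a < n → ∀ md : Int, -1 ≤ md →
      (PySem.List.pyRange (a : Int) 0 (-1)).foldl (fun md j => innerAwhile arr lmi j md) md =
        max md (Mspec arr a) := by
  intro a
  induction a with
  | zero =>
    intro _ md hmd
    rw [PySem.List.pyRange_neg_one_eq_nil (by omega)]
    simp [Mspec]
    omega
  | succ a ih =>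
    intro ha md hmd
    rw [PySem.List.pyRange_neg_one_cons (by positivity)]
    simp only [List.foldl_cons]
    rw [innerA_eq_chainA arr lmi n hlmi (a + 1) ha md]
    have hc : ((a + 1 : Nat) : Int) - 1 = (a : Int) := by push_cast; ring
    rw [hc, ih (by omega) _ (le_trans hmd (le_chainA arr _ _))]
    have h1 : chainA arr (a + 1) md = max md (chainA arr (a + 1) (-1)) := by
      rw [show md = max md (-1) from (max_eq_left hmd).symm, chainA_max, max_eq_left hmd]
    rw [h1, Mspec]
    rw [max_assoc, max_comm (chainA arr (a + 1) (-1)) (Mspec arr a), ← max_assoc]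

theorem foldB_eq_bspec (arr : List Int) : ∀ m : Nat,
    (List.range m).foldl (fun (s : Int × Int) (k : Nat) =>
      ((if PySem.List.pyGetD arr s.2 0 < PySem.List.pyGetD arr (1 + (k : Int)) 0 then max s.1 ((1 + (k : Int)) - s.2) else s.1),
       (if PySem.List.pyGetD arr (1 + (k : Int)) 0 < PySem.List.pyGetD arr s.2 0 then 1 + (k : Int) else s.2))) ((-1 : Int), (0 : Int)) =
      (bspec arr m, Lm arr m) := by
  intro m
  induction m with
  | zero => simp [bspec, Lm]
  | succ m ih =>
    rw [List.range_succ, List.foldl_append, ih]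
    have hc : (1 : Int) + (m : Int) = (m : Int) + 1 := by ring
    simp only [List.foldl_cons, List.foldl_nil, hc]
    rw [bspec, Lm]

theorem AB_eq (N : Int) (arr : List Int) :
    max_index_difference N arr = max_index_difference_alt N arr := by
  unfold max_index_difference max_index_difference_alt
  dsimp only
  by_cases h2 : N < 2
  · simp [h2]
  · rw [if_neg h2, if_neg h2]
    have hN : 2 ≤ N := by omega
    obtain ⟨n, rfl⟩ : ∃ n : Nat, N = (n : Int) := ⟨N.toNat, by omega⟩
    have hn2 : 2 ≤ n := by exact_mod_cast hN
    -- first loop of A: lmi equals the fold of stepA over List.range (n-1)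
    have hrange1 : PySem.List.pyRange 1 (n : Int) 1 = (List.range (n - 1)).map (fun (k : Nat) => 1 + (k : Int)) := by
      rw [PySem.List.pyRange_one]
      congr 2
      omega
    -- lmi0 is just replicate
    have hrep : PySem.List.pySetD (PySem.List.pyRepeat [(0 : Int)] (n : Int)) 0 0 = List.replicate n (0 : Int) := by
      rw [PySem.List.pyRepeat_singleton, PySem.List.pySetD_of_nonneg _ _ (by omega)]
      rw [show ((n : Int)).toNat = n by omega]
      cases hcn : n with
      | zero => omega
      | succ m => simp [List.replicate_succ]
    rw [hrange1, hrep, List.foldl_map]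
    have hfold : ((List.range (n - 1)).foldl
        (fun l (k : Nat) => (fun l i =>
          if PySem.List.pyGetD arr i 0 < PySem.List.pyGetD arr (PySem.List.pyGetD l (i - 1) 0) 0 then
            PySem.List.pySetD l i i
          else
            PySem.List.pySetD l i (PySem.List.pyGetD l (i - 1) 0)) l (1 + (k : Int)))
        (List.replicate n (0 : Int))) =
        (List.range (n - 1)).foldl (fun l (k : Nat) => stepA arr l (1 + (k : Int))) (List.replicate n (0 : Int)) := rfl
    rw [hfold]
    set lmi := (List.range (n - 1)).foldl (fun l (k : Nat) => stepA arr l (1 + (k : Int))) (List.replicate n (0 : Int)) with hlmidef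
    have hinv := lmi_inv arr n (by omega) (n - 1) (le_refl _)
    have hlmi : ∀ k : Nat, k < n → PySem.List.pyGetD lmi (k : Int) 0 = Lm arr k := by
      intro k hk
      exact hinv.2 k (by omega)
    -- second loop of A
    have hN1 : (n : Int) - 1 = ((n - 1 : Nat) : Int) := by omega
    rw [hN1, foldA_eq_Mspec arr lmi n hlmi (n - 1) (by omega) (-1) (le_refl _)]
    -- B's loop
    rw [List.foldl_map]
    have hB := foldB_eq_bspec arr (n - 1)
    rw [show ((List.range (n - 1)).foldl
        (fun s (k : Nat) => (fun (s : Int × Int) k =>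
          ((if PySem.List.pyGetD arr s.2 0 < PySem.List.pyGetD arr k 0 then max s.1 (k - s.2) else s.1),
           (if PySem.List.pyGetD arr k 0 < PySem.List.pyGetD arr s.2 0 then k else s.2))) s (1 + (k : Int)))
        ((-1 : Int), (0 : Int))) =
        (List.range (n - 1)).foldl (fun (s : Int × Int) (k : Nat) =>
          ((if PySem.List.pyGetD arr s.2 0 < PySem.List.pyGetD arr (1 + (k : Int)) 0 then max s.1 ((1 + (k : Int)) - s.2) else s.1),
           (if PySem.List.pyGetD arr (1 + (k : Int)) 0 < PySem.List.pyGetD arr s.2 0 then 1 + (k : Int) else s.2))) ((-1 : Int), (0 : Int)) from rfl]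
    rw [hB]
    rw [bspec_eq_Mspec]
    have := neg_one_le_Mspec arr (n - 1)
    omega

-- ===== VERDICT (by name: the statement is the Claim_ definition above) =====
theorem max_index_difference_spec : Claim_equal_max_index_difference := by
  intro N arr _ _
  unfold Spec_max_index_difference
  exact AB_eq N arr
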